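-- pv_equiv track=rewrite | github.com/bopopescu/lazero | metalearning/generic/test/rewire.py | examinator
-- ===== SOURCE A (Python) =====
-- def examinator(a):
--     x0, l=[[],[]], len(a)-1
--     for x in range(l+1):
--         if a[x]==2:
--             if x<l:
--                 if a[x+1]==2:
--                     x0[0].append(x)
--             if x>0:
--                 if a[x-1]==2:
--                     x0[1].append(x)
--     return x0
-- ===== SOURCE B (Python) =====
-- def examinator(a):
--     n = len(a)
--     left, right = [], []
--     i = 0
--     while i < n:
--         if a[i] != 2:
--             i += 1
--         else:
--             j = i
--             while j < n and a[j] == 2: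
--                 j += 1
--             left.extend(range(i, j - 1))
--             right.extend(range(i + 1, j))
--             i = j
--     return [left, right]
-- ===== Notes on version B (the rewrite author's own statement) =====
-- stated objective: alternative
-- what changed: B is a run-length scan: it skips to each maximal run of consecutive 2s and emits the whole index ranges range(i, j-1) and range(i+1, j) for that run at once, instead of A's per-element test with guarded neighbor lookups.
import Mathlib
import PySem

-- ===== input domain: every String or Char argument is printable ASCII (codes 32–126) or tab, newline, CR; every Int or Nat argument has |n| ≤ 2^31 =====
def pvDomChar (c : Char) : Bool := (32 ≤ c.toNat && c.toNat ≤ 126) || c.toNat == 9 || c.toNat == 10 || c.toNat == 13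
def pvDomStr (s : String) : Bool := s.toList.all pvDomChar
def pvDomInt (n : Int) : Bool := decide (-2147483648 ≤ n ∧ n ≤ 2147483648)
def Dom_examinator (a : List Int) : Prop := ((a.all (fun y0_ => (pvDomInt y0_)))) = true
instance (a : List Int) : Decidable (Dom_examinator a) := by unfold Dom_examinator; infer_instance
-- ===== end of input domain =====

-- B is a run-length scan emitting whole index ranges per maximal run of 2s, instead of A's per-element guarded neighbor checks; objective: alternative.


-- ===== PORT A =====
def examinator (a : List Int) : List (List Int) :=
  let l : Int := PySem.List.len a - 1
  let x0 := (PySem.List.pyRange 0 (l + 1) 1).foldl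
    (fun (p : List Int × List Int) x =>
      if PySem.List.pyGet? a x = some 2 then
        let p1 := if x < l then
            (if PySem.List.pyGet? a (x + 1) = some 2 then (p.1 ++ [x], p.2) else p)
          else p
        if 0 < x then
          (if PySem.List.pyGet? a (x - 1) = some 2 then (p1.1, p1.2 ++ [x]) else p1)
        else p1
      else p) ([], [])
  [x0.1, x0.2]

-- ===== PORT B =====
-- inner while loop: advance j to the end of the run of 2s
def pvRunEnd (a : List Int) (j : Int) : Int :=
  if h : j < PySem.List.len a ∧ PySem.List.pyGet? a j = some 2 then pvRunEnd a (j + 1)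
  else j
termination_by (PySem.List.len a - j).toNat
decreasing_by simp only [PySem.List.len_eq] at h ⊢; omega

-- pvRunEnd never moves backwards (needed for the outer loop's termination)
theorem pvRunEnd_ge (a : List Int) (j : Int) : j ≤ pvRunEnd a j := by
  induction j using pvRunEnd.induct a with
  | case1 j h ih => rw [pvRunEnd, dif_pos h]; omega
  | case2 j h => rw [pvRunEnd, dif_neg h]

-- outer while loop of Source B
def pvOuter (a : List Int) (i : Int) (acc : List Int × List Int) : List Int × List Int :=
  if h : i < PySem.List.len a then
    if PySem.List.pyGet? a i ≠ some 2 then pvOuter a (i + 1) acc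
    else
      let j := pvRunEnd a i
      pvOuter a j (acc.1 ++ PySem.List.pyRange i (j - 1) 1,
                   acc.2 ++ PySem.List.pyRange (i + 1) j 1)
  else acc
termination_by (PySem.List.len a - i).toNat
decreasing_by
  · simp only [PySem.List.len_eq] at h ⊢; omega
  · have h2 : i + 1 ≤ pvRunEnd a i := by
      rw [pvRunEnd]
      rename_i hget
      rw [dif_pos ⟨h, by simpa using hget⟩]
      exact pvRunEnd_ge a (i + 1)
    simp only [PySem.List.len_eq] at h ⊢; omega

def examinator_alt (a : List Int) : List (List Int) :=
  let r := pvOuter a 0 ([], [])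
  [r.1, r.2]

-- ===== PRECONDITION & SPEC =====
def Spec_examinator (a : List Int) (out : List (List Int)) : Prop := out = examinator_alt a
instance (a : List Int) (out : List (List Int)) : Decidable (Spec_examinator a out) := by unfold Spec_examinator; infer_instance

-- ===== CLAIM =====
def Claim_equal_examinator : Prop := ∀ (a : List Int), Dom_examinator a → Spec_examinator a (examinator a)

-- ===== LEMMAS AND PROOFS =====

-- left-list condition of A's loop body
def pvA0 (a : List Int) (x : Int) : Bool :=
  (PySem.List.pyGet? a x == some 2) && decide (x < PySem.List.len a - 1)
    && (PySem.List.pyGet? a (x + 1) == some 2)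

-- right-list condition of A's loop body
def pvA1 (a : List Int) (x : Int) : Bool :=
  (PySem.List.pyGet? a x == some 2) && decide (0 < x)
    && (PySem.List.pyGet? a (x - 1) == some 2)

theorem pvFoldA (a : List Int) (xs : List Int) (acc : List Int × List Int) :
    xs.foldl
      (fun (p : List Int × List Int) x =>
        if PySem.List.pyGet? a x = some 2 then
          let p1 := if x < PySem.List.len a - 1 then
              (if PySem.List.pyGet? a (x + 1) = some 2 then (p.1 ++ [x], p.2) else p)
            else p
          if 0 < x then
            (if PySem.List.pyGet? a (x - 1) = some 2 then (p1.1, p1.2 ++ [x]) else p1)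
          else p1
        else p) acc
    = (acc.1 ++ xs.filter (pvA0 a), acc.2 ++ xs.filter (pvA1 a)) := by
  induction xs generalizing acc with
  | nil => simp
  | cons x xs ih =>
    rw [List.foldl_cons, ih]
    simp only [List.filter_cons, pvA0, pvA1]
    by_cases h0 : PySem.List.pyGet? a x = some 2 <;>
      by_cases h1 : x < (a.length : Int) - 1 <;>
        by_cases h2 : PySem.List.pyGet? a (x + 1) = some 2 <;>
          by_cases h3 : (0:Int) < x <;>
            by_cases h4 : PySem.List.pyGet? a (x - 1) = some 2 <;>
              simp [PySem.List.len_eq, h0, h1, h2, h3, h4]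

-- characterisation of the run end: everything in [j, pvRunEnd a j) is a 2, and the run end itself is not
theorem pvRunEnd_all2 (a : List Int) (j : Int) :
    ∀ k, j ≤ k → k < pvRunEnd a j → PySem.List.pyGet? a k = some 2 := by
  induction j using pvRunEnd.induct a with
  | case1 j h ih =>
    intro k hk1 hk2
    rw [pvRunEnd, dif_pos h] at hk2
    rcases eq_or_lt_of_le hk1 with rfl | hlt
    · exact h.2
    · exact ih k (by omega) hk2
  | case2 j h =>
    intro k hk1 hk2
    rw [pvRunEnd, dif_neg h] at hk2
    omega

theorem pvRunEnd_not2 (a : List Int) (j : Int) :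
    ¬ (pvRunEnd a j < PySem.List.len a ∧ PySem.List.pyGet? a (pvRunEnd a j) = some 2) := by
  induction j using pvRunEnd.induct a with
  | case1 j h ih => rw [pvRunEnd, dif_pos h]; exact ih
  | case2 j h => rw [pvRunEnd, dif_neg h]; exact h

theorem pvRunEnd_le (a : List Int) (j : Int) (hj : j ≤ PySem.List.len a) :
    pvRunEnd a j ≤ PySem.List.len a := by
  induction j using pvRunEnd.induct a with
  | case1 j h ih => rw [pvRunEnd, dif_pos h]; exact ih (by omega)
  | case2 j h => rw [pvRunEnd, dif_neg h]; exact hj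

-- out-of-range (on the high side) indices are not 2
theorem pvGet_none (a : List Int) (k : Int) (hk : PySem.List.len a ≤ k) (hk0 : 0 ≤ k) :
    PySem.List.pyGet? a k ≠ some 2 := by
  simp only [PySem.List.len_eq] at hk
  rw [PySem.List.pyGet?_of_nonneg a hk0]
  have hlen : a.length ≤ k.toNat := by omega
  simp [List.getElem?_eq_none hlen]

-- the main loop invariant: pvOuter accumulates exactly A's two filters over the remaining range
theorem pvOuter_eq (a : List Int) (i : Int) (acc : List Int × List Int)
    (hi : 0 ≤ i)
    (hinv : i = 0 ∨ PySem.List.pyGet? a (i - 1) ≠ some 2 ∨ PySem.List.pyGet? a i ≠ some 2) :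
    pvOuter a i acc
      = (acc.1 ++ (PySem.List.pyRange i (PySem.List.len a) 1).filter (pvA0 a),
         acc.2 ++ (PySem.List.pyRange i (PySem.List.len a) 1).filter (pvA1 a)) := by
  induction i, acc using pvOuter.induct a with
  | case1 i acc h hne ih =>
    -- skip branch: a[i] ≠ 2
    rw [pvOuter, dif_pos h, if_pos hne, ih (by omega) (by right; left; simpa using hne)]
    rw [PySem.List.pyRange_one_cons h, List.filter_cons]
    have h0 : pvA0 a i = false := by simp [pvA0, hne]
    have h1 : pvA1 a i = false := by simp [pvA1, hne]
    simp [h0, h1]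
  | case2 i acc h hget j ih =>
    -- run branch: a[i] = 2
    simp only [not_not] at hget
    have hjdef : j = pvRunEnd a i := rfl
    have hj1 : i + 1 ≤ j := by
      rw [hjdef, pvRunEnd, dif_pos ⟨h, hget⟩]; exact pvRunEnd_ge a (i + 1)
    have hjle : j ≤ PySem.List.len a := by rw [hjdef]; exact pvRunEnd_le a i (by omega)
    have hall : ∀ k, i ≤ k → k < j → PySem.List.pyGet? a k = some 2 := by
      rw [hjdef]; exact pvRunEnd_all2 a i
    have hnot : ¬ (j < PySem.List.len a ∧ PySem.List.pyGet? a j = some 2) := by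
      rw [hjdef]; exact pvRunEnd_not2 a i
    have hjnot2 : PySem.List.pyGet? a j ≠ some 2 := by
      by_cases hjl : j < PySem.List.len a
      · exact fun hc => hnot ⟨hjl, hc⟩
      · exact pvGet_none a j (by omega) (by omega)
    -- filter pvA0 over the run [i, j) keeps everything but the last index
    have f0run : (PySem.List.pyRange i j 1).filter (pvA0 a) = PySem.List.pyRange i (j - 1) 1 := by
      rw [PySem.List.pyRange_one_append i (j - 1) j (by omega) (by omega), List.filter_append]
      have hsing : PySem.List.pyRange (j - 1) j 1 = [j - 1] := by
        have := PySem.List.pyRange_one_singleton (a := j - 1)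
        simpa using this
      have hlastF : pvA0 a (j - 1) = false := by
        simp only [pvA0]
        simp
        intro _ _
        exact hjnot2
      have hsel : (PySem.List.pyRange i (j - 1) 1).filter (pvA0 a) = PySem.List.pyRange i (j - 1) 1 := by
        apply List.filter_eq_self.mpr
        intro k hk
        obtain ⟨hk1, hk2⟩ := PySem.List.mem_pyRange_one.mp hk
        have e1 : PySem.List.pyGet? a k = some 2 := hall k hk1 (by omega)
        have e2 : PySem.List.pyGet? a (k + 1) = some 2 := hall (k + 1) (by omega) (by omega)
        have e3 : k < (a.length : Int) - 1 := by
          have hj' := hjle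
          simp only [PySem.List.len_eq] at hj'
          omega
        simp [pvA0, e1, e2, e3]
      rw [hsing, hsel]
      simp [hlastF]
    -- filter pvA1 over the run [i, j) keeps everything but the first index
    have f1run : (PySem.List.pyRange i j 1).filter (pvA1 a) = PySem.List.pyRange (i + 1) j 1 := by
      rw [PySem.List.pyRange_one_cons (by omega : i < j), List.filter_cons]
      have hfirst : pvA1 a i = false := by
        rcases hinv with rfl | hprev | hcur
        · simp [pvA1]
        · simp [pvA1, hprev]
        · exact absurd hget hcur
      have hsel : (PySem.List.pyRange (i + 1) j 1).filter (pvA1 a) = PySem.List.pyRange (i + 1) j 1 := by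
        apply List.filter_eq_self.mpr
        intro k hk
        obtain ⟨hk1, hk2⟩ := PySem.List.mem_pyRange_one.mp hk
        have e1 : PySem.List.pyGet? a k = some 2 := hall k (by omega) hk2
        have e2 : PySem.List.pyGet? a (k - 1) = some 2 := hall (k - 1) (by omega) (by omega)
        have e3 : (0:Int) < k := by omega
        simp [pvA1, e1, e2, e3]
      rw [hsel]
      simp [hfirst]
    have e0 : (PySem.List.pyRange i (PySem.List.len a) 1).filter (pvA0 a)
        = PySem.List.pyRange i (j - 1) 1 ++ (PySem.List.pyRange j (PySem.List.len a) 1).filter (pvA0 a) := by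
      rw [PySem.List.pyRange_one_append i j (PySem.List.len a) (by omega) hjle,
          List.filter_append, f0run]
    have e1 : (PySem.List.pyRange i (PySem.List.len a) 1).filter (pvA1 a)
        = PySem.List.pyRange (i + 1) j 1 ++ (PySem.List.pyRange j (PySem.List.len a) 1).filter (pvA1 a) := by
      rw [PySem.List.pyRange_one_append i j (PySem.List.len a) (by omega) hjle,
          List.filter_append, f1run]
    rw [pvOuter, dif_pos h, if_neg (by simp [hget])]
    rw [ih (by omega) (Or.inr (Or.inr hjnot2)), e0, e1]
    simp [List.append_assoc]
  | case3 i acc h =>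
    rw [pvOuter, dif_neg h]
    rw [PySem.List.pyRange_one_eq_nil (by omega)]
    simp

-- ===== VERDICT =====
theorem examinator_spec : Claim_equal_examinator := by
  intro a _
  show examinator a = examinator_alt a
  simp only [examinator, examinator_alt]
  rw [pvFoldA]
  rw [pvOuter_eq a 0 ([], []) le_rfl (Or.inl rfl)]
  simp only [List.nil_append, sub_add_cancel]
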